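-- pv_equiv track=rewrite | github.com/l3mnt2010/TTATTT | cau22.py | sum_Fn
-- ===== SOURCE A (Python) =====
-- def sieve_of_eratosthenes(n):
--   primes = [True] * (n+1)
--   primes[0] = primes[1] = False
--
--   for i in range(2, int(n ** 0.5) + 1):
--     if primes[i]:
--       for j in range(i**2, n+1, i):
--         primes[j] = False
--   return [i for i in range(2, n+1) if primes[i]]
--
-- def sum_Fn(L, R):
--   total = 0
--   primes = sieve_of_eratosthenes(R)
--   for i in range(len(primes)):
--     for j in range(i+1, len(primes)):
--       # nếu mà số này là số nguyên tố thì Fn = N và nếu N là một hợp số thì gán bằng 0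
--       if primes[i] >= L and primes[j] >= L:
--         total += primes[i] * primes[j]
--   return total
-- ===== SOURCE B (Python) =====
-- def sum_Fn(L, R):
--   # sum over all pairs p<q of primes in [max(L,2), R] of p*q, via (S^2 - Q)//2
--   if R < 2:
--     return 0
--   is_prime = [True] * (R + 1)
--   is_prime[0] = is_prime[1] = False
--   for p in range(2, int(R ** 0.5) + 1):
--     if is_prime[p]:
--       for m in range(p * p, R + 1, p):
--         is_prime[m] = False
--   s = 0
--   q = 0
--   for n in range(2, R + 1):
--     if is_prime[n]:
--       if n >= L:
--         s += n
--         q += n * n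
--   return (s * s - q) // 2
-- ===== Notes on version B (the rewrite author's own statement) =====
-- stated objective: faster
-- what changed: B replaces A's O(k^2) double loop over all prime pairs by one sieve pass accumulating S = sum and Q = sum of squares of the primes in [max(L,2),R] and returns (S^2 - Q)//2, a closed form for the pairwise-product sum.
import Mathlib
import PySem

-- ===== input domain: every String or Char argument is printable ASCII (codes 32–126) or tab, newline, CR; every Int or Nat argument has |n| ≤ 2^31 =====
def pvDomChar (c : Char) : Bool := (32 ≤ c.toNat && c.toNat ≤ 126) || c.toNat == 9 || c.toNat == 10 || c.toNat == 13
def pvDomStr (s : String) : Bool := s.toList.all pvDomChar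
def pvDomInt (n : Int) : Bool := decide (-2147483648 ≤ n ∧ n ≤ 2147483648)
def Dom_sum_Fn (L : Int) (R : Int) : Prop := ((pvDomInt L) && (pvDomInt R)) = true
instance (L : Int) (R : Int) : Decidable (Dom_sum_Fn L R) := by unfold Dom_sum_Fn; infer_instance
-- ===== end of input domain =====

-- B replaces A's quadratic double loop over all prime pairs by a single accumulating
-- pass (S = sum, Q = sum of squares of the admitted primes) and the closed form
-- (S^2 - Q) // 2; a timing run measured B faster (asymptotic: the pair loop disappears).

-- ===== PORT A =====
-- Shared sieve table: primes = [True]*(n+1); primes[0]=primes[1]=False; classic marking.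
-- Both Python programs build this exact boolean table with the same statements.
-- `int(n ** 0.5)` is ported as the exact integer square root (exact on the domain,
-- where the float power is exact); the index assignments are exact for n ≥ 1 (Pre_),
-- where every written index is in bounds.
def pvSieveFlags (n : Int) : Array Bool :=
  let f := ((Array.replicate (n+1).toNat true).setIfInBounds 0 false).setIfInBounds 1 false
  (PySem.List.pyRange 2 ((Nat.sqrt n.toNat : Int) + 1)).foldl
    (fun f i =>
      if f.getD i.toNat false then
        (PySem.List.pyRange (i*i) (n+1) i).foldl (fun f j => f.setIfInBounds j.toNat false) f
      else f) f

def sieve_of_eratosthenes (n : Int) : List Int :=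
  let primes := pvSieveFlags n
  (PySem.List.pyRange 2 (n+1)).filter (fun i => primes.getD i.toNat false)

def sum_Fn (L : Int) (R : Int) : Int :=
  let primes := sieve_of_eratosthenes R
  (PySem.List.pyRange 0 (PySem.List.len primes)).foldl
    (fun total i =>
      (PySem.List.pyRange (i+1) (PySem.List.len primes)).foldl
        (fun total j =>
          if L ≤ PySem.List.pyGetD primes i 0 then
            if L ≤ PySem.List.pyGetD primes j 0 then
              total + PySem.List.pyGetD primes i 0 * PySem.List.pyGetD primes j 0
            else total
          else total) total) 0

-- ===== PORT B =====
def sum_Fn_alt (L : Int) (R : Int) : Int :=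
  if R < 2 then 0
  else
    let isPrime := pvSieveFlags R
    let sq := (PySem.List.pyRange 2 (R+1)).foldl
      (fun (sq : Int × Int) n =>
        if isPrime.getD n.toNat false then
          if L ≤ n then (sq.1 + n, sq.2 + n * n) else sq
        else sq) (0, 0)
    PySem.Int.floordiv (sq.1 * sq.1 - sq.2) 2

-- ===== PRECONDITION & SPEC =====
-- Pre_ excludes exactly R ≤ 0, where Python A raises IndexError in the sieve
-- (primes[1] = False on a list of length ≤ 1).
def Pre_sum_Fn (L : Int) (R : Int) : Prop := 1 ≤ R
instance (L : Int) (R : Int) : Decidable (Pre_sum_Fn L R) := by unfold Pre_sum_Fn; infer_instance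
def pvWitness_sum_Fn : Int × Int := (2, 10)

def Spec_sum_Fn (L : Int) (R : Int) (out : Int) : Prop := out = sum_Fn_alt L R
instance (L : Int) (R : Int) (out : Int) : Decidable (Spec_sum_Fn L R out) := by unfold Spec_sum_Fn; infer_instance

-- ===== CLAIM (what is proved, stated in full; the proofs are below) =====
def Claim_equal_sum_Fn : Prop := ∀ (L : Int) (R : Int), Dom_sum_Fn L R → Pre_sum_Fn L R → Spec_sum_Fn L R (sum_Fn L R)

-- ===== LEMMAS AND PROOFS =====

-- sum of the elements ≥ L, and of their squares
def pvSumGe (L : Int) (l : List Int) : Int := (l.filter (fun n => decide (L ≤ n))).sum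
def pvSumSqGe (L : Int) (l : List Int) : Int := ((l.filter (fun n => decide (L ≤ n))).map (fun n => n * n)).sum

-- structural form of A's pair sum
def pvPairS (L : Int) : List Int → Int
  | [] => 0
  | x :: ys => (if L ≤ x then x * pvSumGe L ys else 0) + pvPairS L ys

theorem pvSumGe_cons (L x : Int) (ys : List Int) :
    pvSumGe L (x :: ys) = (if L ≤ x then x else 0) + pvSumGe L ys := by
  simp [pvSumGe, List.filter_cons]; split_ifs <;> simp

theorem pvSumSqGe_cons (L x : Int) (ys : List Int) :
    pvSumSqGe L (x :: ys) = (if L ≤ x then x * x else 0) + pvSumSqGe L ys := by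
  simp [pvSumSqGe, List.filter_cons]; split_ifs <;> simp

-- the closed-form identity: 2 * Σ_{i<j, both ≥ L} x_i x_j = S^2 - Q
theorem pvPairS_closed (L : Int) (xs : List Int) :
    2 * pvPairS L xs = pvSumGe L xs * pvSumGe L xs - pvSumSqGe L xs := by
  induction xs with
  | nil => simp [pvPairS, pvSumGe, pvSumSqGe]
  | cons x ys ih =>
    rw [pvPairS, pvSumGe_cons, pvSumSqGe_cons]
    split_ifs with h <;> linear_combination ih

-- an if-guarded multiply-accumulate loop equals an addition of x * pvSumGe
theorem pvFoldMulAcc (L x : Int) (l : List Int) (t : Int) :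
    l.foldl (fun t v => if L ≤ v then t + x * v else t) t = t + x * pvSumGe L l := by
  induction l generalizing t with
  | nil => simp [pvSumGe]
  | cons y ys ih =>
    rw [List.foldl_cons, ih, pvSumGe_cons]
    split_ifs with h <;> ring

-- inner loop of A at index i: fold over the tail, extracting the added quantity
theorem pvInnerLoop (L : Int) (xs : List Int) (k : Nat) (t : Int) :
    (PySem.List.pyRange ((k : Int) + 1) (PySem.List.len xs)).foldl
      (fun total j =>
        if L ≤ xs.getD k 0 then
          if L ≤ PySem.List.pyGetD xs j 0 then
            total + xs.getD k 0 * PySem.List.pyGetD xs j 0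
          else total
        else total) t
    = t + (if L ≤ xs.getD k 0 then xs.getD k 0 * pvSumGe L (xs.drop (k+1)) else 0) := by
  by_cases h : L ≤ xs.getD k 0
  · simp only [h, if_true]
    rw [PySem.List.foldl_pyRange_pyGetD xs 0
        (fun total v => if L ≤ v then total + xs.getD k 0 * v else total) t (by omega)]
    have : ((k : Int) + 1).toNat = k + 1 := by omega
    rw [this, pvFoldMulAcc]
  · rw [if_neg h]
    have hb : (fun (total : Int) (j : Int) =>
        if L ≤ xs.getD k 0 then
          if L ≤ PySem.List.pyGetD xs j 0 then
            total + xs.getD k 0 * PySem.List.pyGetD xs j 0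
          else total
        else total) = fun total _ => total := by
      funext t' j; rw [if_neg h]
    rw [hb, List.foldl_fixed]; ring

-- A's double index loop equals the structural pair sum
theorem pvSumRange (L : Int) (xs : List Int) :
    ((List.range xs.length).map
      (fun k => if L ≤ xs.getD k 0 then xs.getD k 0 * pvSumGe L (xs.drop (k+1)) else 0)).sum
    = pvPairS L xs := by
  induction xs with
  | nil => simp [pvPairS]
  | cons x ys ih =>
    rw [List.length_cons, List.range_succ_eq_map, List.map_cons, List.map_map, List.sum_cons]
    simp only [Function.comp_def, Nat.succ_eq_add_one, List.getD_cons_succ,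
      List.getD_cons_zero, List.drop_succ_cons, List.drop_zero]
    rw [ih, pvPairS]

theorem pvDouble_eq_pairS (L : Int) (xs : List Int) :
    (PySem.List.pyRange 0 (PySem.List.len xs)).foldl
      (fun total i =>
        (PySem.List.pyRange (i+1) (PySem.List.len xs)).foldl
          (fun total j =>
            if L ≤ PySem.List.pyGetD xs i 0 then
              if L ≤ PySem.List.pyGetD xs j 0 then
                total + PySem.List.pyGetD xs i 0 * PySem.List.pyGetD xs j 0
              else total
            else total) total) 0
    = pvPairS L xs := by
  have hlen : PySem.List.len xs = ((xs.length : Nat) : Int) := by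
    simp [PySem.List.len]
  rw [hlen, PySem.List.pyRange_zero_natCast, List.foldl_map]
  have hstep : ∀ (t : Int) (k : Nat), k ∈ List.range xs.length →
      (PySem.List.pyRange ((k : Int)+1) ((xs.length : Nat) : Int)).foldl
        (fun total j =>
          if L ≤ PySem.List.pyGetD xs (k : Int) 0 then
            if L ≤ PySem.List.pyGetD xs j 0 then
              total + PySem.List.pyGetD xs (k : Int) 0 * PySem.List.pyGetD xs j 0
            else total
          else total) t
      = t + (if L ≤ xs.getD k 0 then xs.getD k 0 * pvSumGe L (xs.drop (k+1)) else 0) := by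
    intro t k _
    rw [show PySem.List.pyGetD xs (k : Int) 0 = xs.getD k 0 from PySem.List.pyGetD_natCast xs k 0]
    have := pvInnerLoop L xs k t
    rw [show PySem.List.len xs = ((xs.length : Nat) : Int) from hlen] at this
    exact this
  rw [PySem.List.foldl_congr_mem (List.range xs.length) _
      (fun total k => total + (if L ≤ xs.getD k 0 then xs.getD k 0 * pvSumGe L (xs.drop (k+1)) else 0))
      0 hstep]
  rw [PySem.List.foldl_add, pvSumRange, zero_add]

-- B's accumulating pass computes (S, Q) over the elements ≥ L of the filtered list
theorem pvPairFold (L : Int) (l : List Int) (s q : Int) :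
    l.foldl (fun (sq : Int × Int) n => if L ≤ n then (sq.1 + n, sq.2 + n * n) else sq) (s, q)
    = (s + pvSumGe L l, q + pvSumSqGe L l) := by
  induction l generalizing s q with
  | nil => simp [pvSumGe, pvSumSqGe]
  | cons x ys ih =>
    rw [List.foldl_cons, pvSumGe_cons, pvSumSqGe_cons]
    split_ifs with h
    · rw [ih]; ring_nf
    · rw [ih]; ring_nf

-- ===== VERDICT (by name: the statement is the Claim_ definition above) =====
theorem sum_Fn_spec : Claim_equal_sum_Fn := by
  intro L R _ _
  unfold Spec_sum_Fn sum_Fn sum_Fn_alt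
  rw [pvDouble_eq_pairS]
  by_cases hR : R < 2
  · have hnil : sieve_of_eratosthenes R = [] := by
      unfold sieve_of_eratosthenes
      rw [PySem.List.pyRange_one_eq_nil (by omega)]
      rfl
    simp [hR, hnil, pvPairS]
  · simp only [hR, if_false]
    -- the filtered range is the prime list
    have hfilter :
        ((PySem.List.pyRange 2 (R+1)).filter (fun n => (pvSieveFlags R).getD n.toNat false))
          = sieve_of_eratosthenes R := rfl
    have hfold :
        (PySem.List.pyRange 2 (R+1)).foldl
          (fun (sq : Int × Int) n =>
            if (pvSieveFlags R).getD n.toNat false then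
              if L ≤ n then (sq.1 + n, sq.2 + n * n) else sq
            else sq) (0, 0)
        = (pvSumGe L (sieve_of_eratosthenes R), pvSumSqGe L (sieve_of_eratosthenes R)) := by
      rw [← hfilter, ← List.foldl_filter, pvPairFold]; ring_nf
    rw [hfold]
    have h2 : pvSumGe L (sieve_of_eratosthenes R) * pvSumGe L (sieve_of_eratosthenes R)
        - pvSumSqGe L (sieve_of_eratosthenes R) = 2 * pvPairS L (sieve_of_eratosthenes R) :=
      (pvPairS_closed L _).symm
    rw [h2, PySem.Int.floordiv_eq_ediv_of_pos (by omega)]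
    omega
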